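-- pv_equiv track=rewrite | github.com/NickTidwell/Resume-Buddy | flask/helpers/utility.py | generate_html_diff
-- ===== SOURCE A (Python) =====
-- def generate_html_diff(diff):
--     html_diff = ['<div style="display: flex;">']
--     doc1 = []
--     doc2 = []
--
--     for line in diff:
--         if line.startswith(' '):
--             doc1.append(f'<div>{line[2:]}</div>')
--             doc2.append(f'<div>{line[2:]}</div>')
--         elif line.startswith('-'):
--             doc1.append(f'<div style="background-color: #fdd; color: #d00;">{line[2:]}</div>')
--         elif line.startswith('+'):
--             doc2.append(f'<div style="background-color: #dfd; color: #080;">{line[2:]}</div>')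
--
--     html_diff.append(f'<div style="width: 50%; border-right: 1px solid #ccc; padding: 10px;">{"".join(doc1)}</div>')
--     html_diff.append(f'<div style="width: 50%; padding: 10px;">{"".join(doc2)}</div>')
--     html_diff.append('</div>')
--
--     return ''.join(html_diff)
-- ===== SOURCE B (Python) =====
-- def generate_html_diff(diff):
--     doc1 = ''.join(
--         f'<div>{line[2:]}</div>' if line.startswith(' ')
--         else f'<div style="background-color: #fdd; color: #d00;">{line[2:]}</div>'
--         for line in diff if line.startswith(' ') or line.startswith('-'))
--     doc2 = ''.join(
--         f'<div>{line[2:]}</div>' if line.startswith(' ')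
--         else f'<div style="background-color: #dfd; color: #080;">{line[2:]}</div>'
--         for line in diff if line.startswith(' ') or line.startswith('+'))
--     return ('<div style="display: flex;">'
--             f'<div style="width: 50%; border-right: 1px solid #ccc; padding: 10px;">{doc1}</div>'
--             f'<div style="width: 50%; padding: 10px;">{doc2}</div>'
--             '</div>')
-- ===== Notes on version B (the rewrite author's own statement) =====
-- stated objective: alternative
-- what changed: Replaces A's single categorising loop that appends into two list accumulators with two independent filtered generator passes (one per column) joined directly, and assembles the result as one string expression instead of a list of fragments.
import Mathlib
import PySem

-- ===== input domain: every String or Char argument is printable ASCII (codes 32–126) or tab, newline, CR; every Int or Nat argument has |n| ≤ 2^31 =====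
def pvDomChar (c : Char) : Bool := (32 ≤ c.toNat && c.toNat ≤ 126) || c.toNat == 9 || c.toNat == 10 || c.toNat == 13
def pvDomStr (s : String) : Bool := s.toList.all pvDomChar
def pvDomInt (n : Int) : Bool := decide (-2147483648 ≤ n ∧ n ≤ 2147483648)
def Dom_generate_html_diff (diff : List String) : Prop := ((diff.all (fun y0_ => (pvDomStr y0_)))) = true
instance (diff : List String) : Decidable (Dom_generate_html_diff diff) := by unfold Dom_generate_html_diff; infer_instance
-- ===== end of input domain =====

-- B replaces A's single two-accumulator loop with two independent filtered passes (one per column); objective: alternative decomposition, same cost.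

-- shared HTML fragment builders (the f-string pieces both Pythons write out literally)
def pvText2 (line : String) : String := PySem.Str.slice line (some 2) none  -- line[2:]
def pvPlainDiv (line : String) : String := "<div>" ++ pvText2 line ++ "</div>"
def pvRedDiv (line : String) : String := "<div style=\"background-color: #fdd; color: #d00;\">" ++ pvText2 line ++ "</div>"
def pvGreenDiv (line : String) : String := "<div style=\"background-color: #dfd; color: #080;\">" ++ pvText2 line ++ "</div>"

-- ===== PORT A =====
-- the for-loop over diff, carrying the two list accumulators doc1, doc2
def pvALoop (rest : List String) (doc1 doc2 : List String) : List String × List String :=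
  match rest with
  | [] => (doc1, doc2)
  | line :: rest =>
    if PySem.Str.startswith line " " then
      pvALoop rest (doc1 ++ [pvPlainDiv line]) (doc2 ++ [pvPlainDiv line])
    else if PySem.Str.startswith line "-" then
      pvALoop rest (doc1 ++ [pvRedDiv line]) doc2
    else if PySem.Str.startswith line "+" then
      pvALoop rest doc1 (doc2 ++ [pvGreenDiv line])
    else
      pvALoop rest doc1 doc2

def generate_html_diff (diff : List String) : String :=
  let docs := pvALoop diff [] []
  let html_diff : List String :=
    ["<div style=\"display: flex;\">"]
    ++ ["<div style=\"width: 50%; border-right: 1px solid #ccc; padding: 10px;\">" ++ PySem.Str.join "" docs.1 ++ "</div>"]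
    ++ ["<div style=\"width: 50%; padding: 10px;\">" ++ PySem.Str.join "" docs.2 ++ "</div>"]
    ++ ["</div>"]
  PySem.Str.join "" html_diff

-- ===== PORT B =====
def generate_html_diff_alt (diff : List String) : String :=
  let doc1 := PySem.Str.join ""
    ((diff.filter (fun line => PySem.Str.startswith line " " || PySem.Str.startswith line "-")).map
      (fun line => if PySem.Str.startswith line " " then pvPlainDiv line else pvRedDiv line))
  let doc2 := PySem.Str.join ""
    ((diff.filter (fun line => PySem.Str.startswith line " " || PySem.Str.startswith line "+")).map
      (fun line => if PySem.Str.startswith line " " then pvPlainDiv line else pvGreenDiv line))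
  "<div style=\"display: flex;\">"
    ++ ("<div style=\"width: 50%; border-right: 1px solid #ccc; padding: 10px;\">" ++ doc1 ++ "</div>")
    ++ ("<div style=\"width: 50%; padding: 10px;\">" ++ doc2 ++ "</div>")
    ++ "</div>"

-- ===== PRECONDITION & SPEC =====
def Spec_generate_html_diff (diff : List String) (out : String) : Prop := out = generate_html_diff_alt diff
instance (diff : List String) (out : String) : Decidable (Spec_generate_html_diff diff out) := by unfold Spec_generate_html_diff; infer_instance

-- ===== CLAIM (what is proved, stated in full; the proofs are below) =====
def Claim_equal_generate_html_diff : Prop := ∀ (diff : List String), Dom_generate_html_diff diff → Spec_generate_html_diff diff (generate_html_diff diff)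

-- ===== LEMMAS AND PROOFS =====

-- A's loop leaves in doc1/doc2 exactly the filtered-and-styled columns B builds.
theorem pvALoop_eq (diff : List String) : ∀ (doc1 doc2 : List String),
    pvALoop diff doc1 doc2 =
      (doc1 ++ (diff.filter (fun line => PySem.Str.startswith line " " || PySem.Str.startswith line "-")).map
        (fun line => if PySem.Str.startswith line " " then pvPlainDiv line else pvRedDiv line),
       doc2 ++ (diff.filter (fun line => PySem.Str.startswith line " " || PySem.Str.startswith line "+")).map
        (fun line => if PySem.Str.startswith line " " then pvPlainDiv line else pvGreenDiv line)) := by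
  induction diff with
  | nil => intro doc1 doc2; simp [pvALoop]
  | cons line rest ih =>
    intro doc1 doc2
    by_cases hs : PySem.Chars.startswith line.toList [' ']
    · simp [pvALoop, hs, ih]
    · by_cases hm : PySem.Chars.startswith line.toList ['-']
      · -- a line cannot start with both '-' and '+'
        obtain ⟨t, ht⟩ := (PySem.Chars.startswith_iff _ _).mp hm
        simp [pvALoop, hs, hm, ih,
          show PySem.Chars.startswith line.toList ['+'] = false by
            rw [Bool.eq_false_iff]; intro hp
            obtain ⟨u, hu⟩ := (PySem.Chars.startswith_iff _ _).mp hp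
            rw [← ht] at hu; simp at hu]
      · by_cases hp : PySem.Chars.startswith line.toList ['+']
        · simp [pvALoop, hs, hm, hp, ih]
        · simp [pvALoop, hs, hm, hp, ih]

theorem pvJoinFour (a b c d : String) : PySem.Str.join "" [a, b, c, d] = a ++ b ++ c ++ d := by
  simp [PySem.Str.join, PySem.Chars.join, List.intercalate, String.append_assoc]

-- ===== VERDICT (by name: the statement is the Claim_ definition above) =====
theorem generate_html_diff_spec : Claim_equal_generate_html_diff := by
  intro diff _
  unfold Spec_generate_html_diff generate_html_diff generate_html_diff_alt
  rw [pvALoop_eq]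
  simp only [List.nil_append, List.cons_append]
  rw [pvJoinFour]
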